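-- pv_equiv track=rewrite | github.com/hope77-githhub/Prog_code | data_extraction.py | filter_significant_indices
-- ===== SOURCE A (Python) =====
-- from typing import List, Dict, Tuple
--
-- def filter_significant_indices(indices: List[Tuple[int, int]],
--                                start_times: List[int],
--                                end_times: List[int],
--                                CI: int) -> List[Tuple[int, int]]:
--     filtered = []
--     for (s_idx, e_idx) in indices:
--         if s_idx < e_idx < len(start_times):
--             is_valid = True
--             for k in range(s_idx, e_idx):
--                 gap = start_times[k+1] - end_times[k]
--                 if gap > CI:
--                     is_valid = False
--                     break
--             if is_valid:
--                 filtered.append((s_idx, e_idx))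
--         elif s_idx == e_idx:
--             filtered.append((s_idx, e_idx))
--     return filtered
-- ===== SOURCE B (Python) =====
-- def filter_significant_indices(indices, start_times, end_times, CI):
--     n = len(start_times)
--     # prefix[i] = number of gaps with index < i exceeding CI (only gaps whose
--     # endpoints exist are counted; valid pairs never look past them)
--     m = min(n - 1, len(end_times))
--     prefix = [0]
--     for k in range(m):
--         bad = 1 if start_times[k + 1] - end_times[k] > CI else 0
--         prefix.append(prefix[-1] + bad)
--     out = []
--     for (s, e) in indices:
--         if s == e:
--             out.append((s, e))
--         elif s < e < n and prefix[e] - prefix[s] == 0: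
--             out.append((s, e))
--     return out
-- ===== Notes on version B (the rewrite author's own statement) =====
-- stated objective: alternative
-- what changed: A rescans every gap in [s,e) for each pair; B makes one pass building a prefix-sum array of bad gaps and decides each pair by the range query prefix[e]-prefix[s]==0.
-- outside the precondition, e.g. on filter_significant_indices([(-1, 0)], [-4, 7], [3], 3): A returns [(-1, 0)], B returns []; on filter_significant_indices([(0, 2)], [0, 99, 0], [0], 0): A returns [], B raises IndexError
import Mathlib
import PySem

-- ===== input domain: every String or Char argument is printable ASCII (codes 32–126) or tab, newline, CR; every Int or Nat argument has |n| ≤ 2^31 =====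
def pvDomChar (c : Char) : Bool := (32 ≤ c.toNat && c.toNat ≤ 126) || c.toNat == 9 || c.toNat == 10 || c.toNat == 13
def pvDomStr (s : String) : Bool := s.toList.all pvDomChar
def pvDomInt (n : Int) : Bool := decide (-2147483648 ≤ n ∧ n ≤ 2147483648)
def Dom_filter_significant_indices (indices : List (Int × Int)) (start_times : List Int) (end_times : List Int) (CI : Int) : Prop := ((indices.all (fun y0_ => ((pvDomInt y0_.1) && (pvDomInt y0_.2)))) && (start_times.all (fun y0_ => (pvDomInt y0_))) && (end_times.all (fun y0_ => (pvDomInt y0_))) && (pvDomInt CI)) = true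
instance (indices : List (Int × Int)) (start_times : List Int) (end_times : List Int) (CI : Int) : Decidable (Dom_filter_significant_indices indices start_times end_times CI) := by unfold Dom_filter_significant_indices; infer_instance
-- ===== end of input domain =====

-- B replaces A's per-pair rescan of the gaps by one prefix-sum pass over the gaps,
-- answering each pair's validity with a single range query (alternative algorithm).


-- ===== PORT A =====
-- start_times[k+1] - end_times[k]; both indices are in range under Pre_ (pyGetD's default is never used there)
def pvGapA (start_times end_times : List Int) (k : Int) : Int :=
  PySem.List.pyGetD start_times (k + 1) 0 - PySem.List.pyGetD end_times k 0

def filter_significant_indices (indices : List (Int × Int)) (start_times : List Int) (end_times : List Int) (CI : Int) : List (Int × Int) :=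
  indices.foldl (fun filtered p =>
    if p.1 < p.2 ∧ p.2 < (start_times.length : Int) then
      -- inner loop with 'break' modelled as a fold over a Bool flag that stays false
      let is_valid := (PySem.List.pyRange p.1 p.2 1).foldl
        (fun v k => if v then (if pvGapA start_times end_times k > CI then false else v) else v) true
      if is_valid then filtered ++ [p] else filtered
    else if p.1 = p.2 then filtered ++ [p] else filtered) []

-- ===== PORT B =====
-- start_times[k+1] - end_times[k]; in range under Pre_
def pvGapB (start_times end_times : List Int) (k : Int) : Int :=
  PySem.List.pyGetD start_times (k + 1) 0 - PySem.List.pyGetD end_times k 0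

-- the prefix-sum pass: pvPrefix[i] = number of gaps with index < i exceeding CI
-- (built once; prefix[-1] is pyGetD acc (-1))
def pvPrefix (start_times end_times : List Int) (CI : Int) : List Int :=
  (PySem.List.pyRange 0 (min ((start_times.length : Int) - 1) (end_times.length : Int)) 1).foldl
    (fun acc k =>
      let bad : Int := if pvGapB start_times end_times k > CI then 1 else 0
      acc ++ [PySem.List.pyGetD acc (-1) 0 + bad]) [(0 : Int)]

def filter_significant_indices_alt (indices : List (Int × Int)) (start_times : List Int) (end_times : List Int) (CI : Int) : List (Int × Int) :=
  let n : Int := start_times.length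
  let pref := pvPrefix start_times end_times CI
  indices.foldl (fun out p =>
    if p.1 = p.2 then out ++ [p]
    else if p.1 < p.2 ∧ p.2 < n ∧ PySem.List.pyGetD pref p.2 0 - PySem.List.pyGetD pref p.1 0 = 0 then
      out ++ [p]
    else out) []

-- ===== PRECONDITION & SPEC =====
-- Pre_ excludes inputs where some pair (s, e) with s < e < len(start_times) has s < 0 (A's value
-- comes from Python's negative-index wraparound and B's from wrapping into the prefix array —
-- both accidental) or e > len(end_times) (A raises IndexError unless it breaks at an earlier
-- bad gap; B's single pass over all gaps raises IndexError there).
def Pre_filter_significant_indices (indices : List (Int × Int)) (start_times : List Int) (end_times : List Int) (CI : Int) : Prop :=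
  ∀ p ∈ indices, p.1 < p.2 → p.2 < (start_times.length : Int) →
    0 ≤ p.1 ∧ p.2 ≤ (end_times.length : Int)
instance (indices : List (Int × Int)) (start_times : List Int) (end_times : List Int) (CI : Int) : Decidable (Pre_filter_significant_indices indices start_times end_times CI) := by unfold Pre_filter_significant_indices; infer_instance

def pvWitness_filter_significant_indices : (List (Int × Int)) × List Int × List Int × Int :=
  ([(0, 1), (2, 2), (0, 2)], [0, 1, 9], [0, 1, 9], 3)

def Spec_filter_significant_indices (indices : List (Int × Int)) (start_times : List Int) (end_times : List Int) (CI : Int) (out : List (Int × Int)) : Prop := out = filter_significant_indices_alt indices start_times end_times CI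
instance (indices : List (Int × Int)) (start_times : List Int) (end_times : List Int) (CI : Int) (out : List (Int × Int)) : Decidable (Spec_filter_significant_indices indices start_times end_times CI out) := by unfold Spec_filter_significant_indices; infer_instance

-- ===== CLAIM (what is proved, stated in full; the proofs are below) =====
def Claim_equal_filter_significant_indices : Prop := ∀ (indices : List (Int × Int)) (start_times : List Int) (end_times : List Int) (CI : Int), Dom_filter_significant_indices indices start_times end_times CI → Pre_filter_significant_indices indices start_times end_times CI → Spec_filter_significant_indices indices start_times end_times CI (filter_significant_indices indices start_times end_times CI)

-- ===== LEMMAS AND PROOFS =====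

-- partial count of bad gaps: number of k < i with gap k > CI (as an Int)
def pvCnt (start_times end_times : List Int) (CI : Int) (i : Int) : Int :=
  ((PySem.List.pyRange 0 i 1).map
    (fun k => if pvGapA start_times end_times k > CI then (1 : Int) else 0)).sum

-- A's inner flag fold is an 'all' over the range
lemma pvFlagFold (g : Int → Int) (CI : Int) :
    ∀ (l : List Int) (b : Bool),
      l.foldl (fun v k => if v then (if g k > CI then false else v) else v) b
        = (b && l.all fun k => !decide (g k > CI)) := by
  intro l
  induction l with
  | nil => intro b; simp
  | cons x xs ih =>
    intro b
    rw [List.foldl_cons, ih]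
    cases b <;> by_cases h : g x > CI <;> simp [h]

-- B's prefix fold is the list of partial bad-gap counts
lemma pvPrefixFold (start_times end_times : List Int) (CI : Int) (m : Nat) :
    (PySem.List.pyRange 0 (m : Int) 1).foldl
      (fun acc k =>
        let bad : Int := if pvGapB start_times end_times k > CI then 1 else 0
        acc ++ [PySem.List.pyGetD acc (-1) 0 + bad]) [(0 : Int)]
      = (List.range (m + 1)).map (fun (i : Nat) => pvCnt start_times end_times CI (i : Int)) := by
  induction m with
  | zero =>
    simp [PySem.List.pyRange_one_eq_nil, pvCnt]
  | succ m ih =>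
    have hsplit : PySem.List.pyRange 0 ((m + 1 : Nat) : Int) 1
        = PySem.List.pyRange 0 (m : Int) 1 ++ [(m : Int)] := by
      push_cast
      exact PySem.List.pyRange_one_succ_right (by positivity)
    rw [hsplit, List.foldl_append, ih]
    have hlast : (List.range (m + 1)).map (fun (i : Nat) => pvCnt start_times end_times CI (i : Int))
        = (List.range m).map (fun (i : Nat) => pvCnt start_times end_times CI (i : Int))
          ++ [pvCnt start_times end_times CI (m : Int)] := by
      simp [List.range_succ]
    have hcnt : pvCnt start_times end_times CI ((m : Int) + 1)
        = pvCnt start_times end_times CI (m : Int)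
          + (if pvGapA start_times end_times (m : Int) > CI then (1 : Int) else 0) := by
      unfold pvCnt
      rw [PySem.List.pyRange_one_succ_right (by positivity)]
      simp
    simp only [List.foldl_cons, List.foldl_nil, hlast,
      PySem.List.pyGetD_neg_one_append_singleton]
    simp [hcnt, pvGapB, pvGapA, List.range_succ]

-- reading the prefix list at a non-negative in-range index gives the partial count
lemma pvPrefixGet (start_times end_times : List Int) (CI : Int) (m : Nat) (i : Int)
    (h0 : 0 ≤ i) (hm : i ≤ (m : Int)) :
    PySem.List.pyGetD
      ((List.range (m + 1)).map (fun (j : Nat) => pvCnt start_times end_times CI (j : Int))) i 0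
      = pvCnt start_times end_times CI i := by
  have hi : i.toNat < m + 1 := by omega
  rw [PySem.List.pyGetD_eq_getElem _ 0 h0 (by simp; omega)]
  simp only [List.getElem_map, List.getElem_range]
  congr 1
  omega

-- the range-query value: cnt e - cnt s = number of bad gaps in [s, e)
lemma pvCnt_diff (start_times end_times : List Int) (CI : Int) (s e : Int)
    (h0 : 0 ≤ s) (hse : s ≤ e) :
    pvCnt start_times end_times CI e - pvCnt start_times end_times CI s
      = (((PySem.List.pyRange s e 1).map
          (fun k => if pvGapA start_times end_times k > CI then (1 : Int) else 0)).sum) := by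
  unfold pvCnt
  rw [PySem.List.pyRange_one_append 0 s e h0 hse]
  simp

-- the prefix list, characterised as the list of partial counts
lemma pvPrefix_eq (start_times end_times : List Int) (CI : Int) :
    pvPrefix start_times end_times CI
      = (List.range (min (start_times.length - 1) end_times.length + 1)).map
          (fun (i : Nat) => pvCnt start_times end_times CI (i : Int)) := by
  unfold pvPrefix
  by_cases h : start_times.length = 0
  · have hm : min ((start_times.length : Int) - 1) (end_times.length : Int) = -1 := by
      simp [h]
    have hM : min (start_times.length - 1) end_times.length = 0 := by omega
    rw [hm, hM, PySem.List.pyRange_one_eq_nil (by omega)]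
    simp [pvCnt, PySem.List.pyRange_one_eq_nil]
  · have hm : min ((start_times.length : Int) - 1) (end_times.length : Int)
        = ((min (start_times.length - 1) end_times.length : Nat) : Int) := by
      push_cast [Nat.cast_min]; omega
    rw [hm]
    exact pvPrefixFold start_times end_times CI _

-- per-pair: A's rescan of the gaps agrees with B's O(1) range query
lemma pvValid_iff (start_times end_times : List Int) (CI : Int) (s e : Int)
    (h0 : 0 ≤ s) (hse : s < e) (hn : e < (start_times.length : Int))
    (he : e ≤ (end_times.length : Int)) :
    ((PySem.List.pyRange s e 1).foldl
        (fun v k => if v then (if pvGapA start_times end_times k > CI then false else v) else v)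
        true = true)
      ↔ (PySem.List.pyGetD (pvPrefix start_times end_times CI) e 0
          - PySem.List.pyGetD (pvPrefix start_times end_times CI) s 0 = 0) := by
  have hMe : e ≤ ((min (start_times.length - 1) end_times.length : Nat) : Int) := by
    push_cast [Nat.cast_min]; omega
  have hMs : s ≤ ((min (start_times.length - 1) end_times.length : Nat) : Int) := by omega
  rw [pvPrefix_eq,
    pvPrefixGet start_times end_times CI _ e (by omega) hMe,
    pvPrefixGet start_times end_times CI _ s h0 hMs,
    pvCnt_diff start_times end_times CI s e h0 (le_of_lt hse),
    pvFlagFold]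
  have hdec : (fun k => if pvGapA start_times end_times k > CI then (1 : Int) else 0)
      = (fun k => if (decide (pvGapA start_times end_times k > CI)) = true then (1 : Int) else 0) := by
    funext k; simp
  rw [hdec, PySem.List.sum_map_ite_one_zero]
  simp [List.countP_eq_zero]
theorem filter_significant_indices_spec : Claim_equal_filter_significant_indices := by
  intro indices start_times end_times CI _hdom hpre
  unfold Spec_filter_significant_indices
  show filter_significant_indices indices start_times end_times CI
      = indices.foldl (fun out p =>
          if p.1 = p.2 then out ++ [p]
          else if p.1 < p.2 ∧ p.2 < (start_times.length : Int)
              ∧ PySem.List.pyGetD (pvPrefix start_times end_times CI) p.2 0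
                - PySem.List.pyGetD (pvPrefix start_times end_times CI) p.1 0 = 0 then
            out ++ [p]
          else out) []
  unfold filter_significant_indices
  apply PySem.List.foldl_congr_mem
  intro acc p hp
  by_cases heq : p.1 = p.2
  · simp [heq]
  · by_cases hlt : p.1 < p.2 ∧ p.2 < (start_times.length : Int)
    · obtain ⟨hb0, hb1⟩ := hpre p hp hlt.1 hlt.2
      by_cases hv : (PySem.List.pyRange p.1 p.2 1).foldl
          (fun v k => if v then (if pvGapA start_times end_times k > CI then false else v) else v)
          true = true
      · have hq := (pvValid_iff start_times end_times CI p.1 p.2 hb0 hlt.1 hlt.2 hb1).mp hv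
        rw [if_pos hlt, if_neg heq, hv]
        simp [hq, hlt.1, hlt.2]
      · have hq : ¬ (PySem.List.pyGetD (pvPrefix start_times end_times CI) p.2 0
            - PySem.List.pyGetD (pvPrefix start_times end_times CI) p.1 0 = 0) :=
          fun h => hv ((pvValid_iff start_times end_times CI p.1 p.2 hb0 hlt.1 hlt.2 hb1).mpr h)
        simp only [Bool.not_eq_true] at hv
        rw [if_pos hlt, if_neg heq, hv]
        simp [hq]
    · simp only [not_and_or] at hlt
      rcases hlt with h | h <;> simp [heq, h]
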